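-- pv_equiv track=rewrite | github.com/BertCalm/XO_OX-XOmnibus | Tools/qa_playtest_generator.py | select_deep_test_engines
-- ===== SOURCE A (Python) =====
-- FLAGSHIP = "Obrix"
--
-- def select_deep_test_engines(
--     all_engines: list[str],
--     preset_counts: dict[str, int],
--     n: int,
-- ) -> list[tuple[str, int]]:
--     """Return up to n engines for deep testing, always leading with the flagship.
--
--     Ordering:
--       1. FLAGSHIP (Obrix) first — always included if present.
--       2. Remaining slots filled by preset count (descending), then alphabetically.
--
--     Returns a list of (engine_name, preset_count) tuples.
--     """
--     engine_set = {e.lower(): e for e in all_engines}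
--
--     # Canonical casing for flagship
--     flagship_canonical = engine_set.get(FLAGSHIP.lower(), FLAGSHIP)
--     flagship_count = preset_counts.get(flagship_canonical, 0)
--
--     # Sort remaining engines by preset count desc, then name asc
--     others = [
--         (e, preset_counts.get(e, 0))
--         for e in all_engines
--         if e.lower() != FLAGSHIP.lower()
--     ]
--     others.sort(key=lambda x: (-x[1], x[0].lower()))
--
--     selected: list[tuple[str, int]] = []
--
--     if flagship_canonical in all_engines or FLAGSHIP in all_engines:
--         selected.append((flagship_canonical, flagship_count))
--
--     for engine, count in others:
--         if len(selected) >= n: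
--             break
--         selected.append((engine, count))
--
--     return selected[:n]
-- ===== SOURCE B (Python) =====
-- FLAGSHIP = "Obrix"
--
-- def select_deep_test_engines(all_engines, preset_counts, n):
--     if n <= 0:
--         return []
--     # last case-insensitive match wins (canonical casing)
--     flagship = None
--     for e in all_engines:
--         if e.lower() == "obrix":
--             flagship = e
--     head = [] if flagship is None else [(flagship, preset_counts.get(flagship, 0))]
--     r = n - len(head)
--     # one pass keeping only the current top-r others in order
--     best = []
--     for e in all_engines:
--         lo = e.lower()
--         if lo == "obrix":
--             continue
--         c = preset_counts.get(e, 0)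
--         i = 0
--         while i < len(best) and (-best[i][1], best[i][0].lower()) <= (-c, lo):
--             i += 1
--         if i < r:
--             best.insert(i, (e, c))
--             if len(best) > r:
--                 best.pop()
--     return head + best
-- ===== Notes on version B (the rewrite author's own statement) =====
-- stated objective: alternative
-- what changed: B replaces A i.e. lowercased-name dict + full sort of all non-flagship engines + append-with-break loop + final slice by a single pass maintaining a bounded sorted buffer of at most the remaining top-r entries (online partial selection: stable insertion point found by scan, overflow popped), plus a keep-last scan for the flagship and an early return for n<=0.
import Mathlib
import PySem

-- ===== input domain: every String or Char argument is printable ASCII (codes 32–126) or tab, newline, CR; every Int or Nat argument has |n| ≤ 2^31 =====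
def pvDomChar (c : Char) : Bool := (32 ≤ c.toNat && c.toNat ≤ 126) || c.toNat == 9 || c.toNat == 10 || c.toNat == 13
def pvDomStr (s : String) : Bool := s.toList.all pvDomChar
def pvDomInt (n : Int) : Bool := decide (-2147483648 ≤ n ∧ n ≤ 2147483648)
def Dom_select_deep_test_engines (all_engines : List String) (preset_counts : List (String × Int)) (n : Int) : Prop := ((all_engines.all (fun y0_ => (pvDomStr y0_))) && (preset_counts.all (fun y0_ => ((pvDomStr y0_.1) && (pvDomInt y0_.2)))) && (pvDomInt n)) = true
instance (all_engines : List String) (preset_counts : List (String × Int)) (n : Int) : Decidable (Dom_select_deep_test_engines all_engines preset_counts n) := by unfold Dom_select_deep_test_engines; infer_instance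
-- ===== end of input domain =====

-- B replaces A's dict + full sort + break-loop + slice by a single pass that maintains a
-- bounded sorted buffer of the current top-r non-flagship engines (online partial selection).

-- ===== PORT A =====
-- 'for engine, count in others: if len(selected) >= n: break; selected.append(...)'
def selLoopA (n : Int) : List (String × Int) → List (String × Int) → List (String × Int)
  | [], sel => sel
  | x :: rest, sel => if n ≤ (sel.length : Int) then sel else selLoopA n rest (sel ++ [x])

def select_deep_test_engines (all_engines : List String) (preset_counts : List (String × Int)) (n : Int) : List (String × Int) :=
  let engine_set : PySem.Dict String String :=
    all_engines.foldl (fun d e => d.insert (PySem.Str.lower e) e) PySem.Dict.empty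
  let flagship_canonical := engine_set.getD (PySem.Str.lower "Obrix") "Obrix"
  let flagship_count := (PySem.Dict.mk preset_counts).getD flagship_canonical 0
  let others := PySem.List.sorted2
    ((all_engines.filter (fun e => PySem.Str.lower e != PySem.Str.lower "Obrix")).map
      (fun e => (e, (PySem.Dict.mk preset_counts).getD e 0)))
    (fun x => -x.2) (fun x => PySem.Str.lower x.1) false
  let selected : List (String × Int) := []
  let selected := if all_engines.contains flagship_canonical || all_engines.contains "Obrix"
    then selected ++ [(flagship_canonical, flagship_count)] else selected
  let selected := selLoopA n others selected
  PySem.List.slice selected none (some n)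

-- ===== PORT B =====
-- 'while i < len(best) and (-best[i][1], best[i][0].lower()) <= (-c, lo): i += 1'
def posLoopB (c : Int) (lo : String) : List (String × Int) → Nat
  | [] => 0
  | y :: ys =>
    if -y.2 < -c ∨ (-y.2 = -c ∧ PySem.Str.lower y.1 ≤ lo) then posLoopB c lo ys + 1 else 0

def select_deep_test_engines_alt (all_engines : List String) (preset_counts : List (String × Int)) (n : Int) : List (String × Int) :=
  if n ≤ 0 then []
  else
    let flagship : Option String :=
      all_engines.foldl (fun acc e => if PySem.Str.lower e == "obrix" then some e else acc) none
    let head : List (String × Int) := match flagship with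
      | none => []
      | some f => [(f, (PySem.Dict.mk preset_counts).getD f 0)]
    let r : Int := n - (head.length : Int)
    let best := all_engines.foldl (fun best e =>
      let lo := PySem.Str.lower e
      if lo == "obrix" then best
      else
        let c := (PySem.Dict.mk preset_counts).getD e 0
        let i := posLoopB c lo best
        if (i : Int) < r then
          let b2 := PySem.List.insert best (i : Int) (e, c)
          if r < (b2.length : Int) then b2.dropLast else b2
        else best) []
    head ++ best

-- ===== PRECONDITION & SPEC =====
def Spec_select_deep_test_engines (all_engines : List String) (preset_counts : List (String × Int)) (n : Int) (out : List (String × Int)) : Prop := out = select_deep_test_engines_alt all_engines preset_counts n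
instance (all_engines : List String) (preset_counts : List (String × Int)) (n : Int) (out : List (String × Int)) : Decidable (Spec_select_deep_test_engines all_engines preset_counts n out) := by unfold Spec_select_deep_test_engines; infer_instance

-- ===== CLAIM (what is proved, stated in full; the proofs are below) =====
def Claim_equal_select_deep_test_engines : Prop := ∀ (all_engines : List String) (preset_counts : List (String × Int)) (n : Int), Dom_select_deep_test_engines all_engines preset_counts n → Spec_select_deep_test_engines all_engines preset_counts n (select_deep_test_engines all_engines preset_counts n)

-- ===== LEMMAS AND PROOFS =====

-- the comparison sorted2 uses on others
def befK (x y : String × Int) : Bool :=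
  decide (-x.2 < -y.2) || (!decide (-y.2 < -x.2) && decide (PySem.Str.lower x.1 < PySem.Str.lower y.1))

-- the last-wins dict lookup IS the reverse-scan find
theorem foldl_insert_lower_get (xs : List String) (d : PySem.Dict String String) :
    (xs.foldl (fun d e => d.insert (PySem.Str.lower e) e) d).get? "obrix"
      = (xs.reverse.find? (fun e => PySem.Str.lower e == "obrix")).or (d.get? "obrix") := by
  induction xs generalizing d with
  | nil => simp
  | cons x rest ih =>
    simp only [List.foldl_cons, List.reverse_cons, List.find?_append, ih]
    by_cases hx : PySem.Str.lower x = "obrix"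
    · cases hfind : (rest.reverse.find? (fun e => PySem.Str.lower e == "obrix")) with
      | some f => simp
      | none =>
        have h2 : (PySem.Str.lower x == "obrix") = true := beq_iff_eq.mpr hx
        simp only [List.find?, h2, Option.or_some]
        rw [hx] at *
        exact PySem.Dict.get?_insert_self d _ x
    · have h1 : (PySem.Dict.insert d (PySem.Str.lower x) x).get? "obrix" = d.get? "obrix" :=
        PySem.Dict.get?_insert_of_ne d x (fun h => hx h.symm)
      have h2 : (PySem.Str.lower x == "obrix") = false := beq_eq_false_iff_ne.mpr hx
      simp [List.find?, h1, h2]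

-- B's keep-last forward scan IS the reverse-scan find too
theorem foldl_keep_last (xs : List String) :
    ∀ init, xs.foldl (fun acc e => if PySem.Str.lower e == "obrix" then some e else acc) init
      = (xs.reverse.find? (fun e => PySem.Str.lower e == "obrix")).or init := by
  induction xs with
  | nil => intro init; simp
  | cons x rest ih =>
    intro init
    simp only [List.foldl_cons, List.reverse_cons, List.find?_append, ih]
    cases hfind : (rest.reverse.find? (fun e => PySem.Str.lower e == "obrix")) with
    | some f => simp
    | none =>
      by_cases hx : PySem.Str.lower x = "obrix"
      · have h1 : (PySem.Str.lower x == "obrix") = true := beq_iff_eq.mpr hx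
        simp [List.find?, h1]
      · have h1 : (PySem.Str.lower x == "obrix") = false := beq_eq_false_iff_ne.mpr hx
        simp [List.find?, h1]

-- A's break-loop is 'take what is still missing'
theorem selLoopA_eq_take (n : Int) (rest : List (String × Int)) :
    ∀ sel, selLoopA n rest sel = sel ++ rest.take ((n - (sel.length : Int)).toNat) := by
  induction rest with
  | nil => intro sel; simp [selLoopA]
  | cons x t ih =>
    intro sel
    simp only [selLoopA]
    by_cases h : n ≤ (sel.length : Int)
    · have : (n - (sel.length : Int)).toNat = 0 := by omega
      simp [h, this]
    · have hlen : ((sel ++ [x]).length : Int) = (sel.length : Int) + 1 := by simp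
      have harith : (n - (sel.length : Int)).toNat = (n - ((sel.length : Int) + 1)).toNat + 1 := by omega
      simp only [h, if_false, ih, hlen, harith, List.take_succ_cons, List.append_assoc,
        List.cons_append, List.nil_append]

-- a nonpositive slice bound on a short list gives []
theorem slice_nonpos_short (l : List (String × Int)) (n : Int) (hn : n ≤ 0) (hl : l.length ≤ 1) :
    PySem.List.slice l none (some n) = [] := by
  simp only [PySem.List.slice, PySem.List.clampIdx]
  split_ifs with h1 h2 <;> simp_all
  omega

-- the forward while-scan finds the stable insertion point
theorem posLoopB_eq_takeWhile (e : String) (c : Int) (l : List (String × Int)) :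
    posLoopB c (PySem.Str.lower e) l = (l.takeWhile (fun y => !befK (e, c) y)).length := by
  induction l with
  | nil => rfl
  | cons y ys ih =>
    simp only [posLoopB, List.takeWhile]
    by_cases h : -y.2 < -c ∨ (-y.2 = -c ∧ PySem.Str.lower y.1 ≤ PySem.Str.lower e)
    · have hb : befK (e, c) y = false := by
        unfold befK
        rcases h with h1 | ⟨h1, h2⟩
        · simp [not_lt.mpr (le_of_lt h1), h1]
        · simp [h1, not_lt.mpr h2]
      rw [if_pos h]
      simp [hb, ih]
    · have hb : befK (e, c) y = true := by
        unfold befK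
        push Not at h
        rcases lt_trichotomy (-c) (-y.2) with h1 | h1 | h1
        · simp [h1]
        · have h2 : PySem.Str.lower e < PySem.Str.lower y.1 := h.2 h1.symm
          simp [h1, h2]
        · exact absurd h1 (not_lt.mpr h.1)
      rw [if_neg h]
      simp [hb]

-- insertBy places its element exactly at the first 'before' position
theorem insertBy_eq_takeWhile_dropWhile (b : (String × Int) → (String × Int) → Bool)
    (x : String × Int) (l : List (String × Int)) :
    PySem.List.insertBy b x l = l.takeWhile (fun y => !b x y) ++ x :: l.dropWhile (fun y => !b x y) := by
  induction l with
  | nil => rfl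
  | cons y ys ih =>
    simp only [PySem.List.insertBy, List.takeWhile, List.dropWhile]
    by_cases h : b x y = true <;> simp [h, ih]

-- take m commutes with insertion into a truncated buffer
theorem take_insertBy_take (b : (String × Int) → (String × Int) → Bool) (x : String × Int) :
    ∀ (m : Nat) (l : List (String × Int)),
      (PySem.List.insertBy b x (l.take m)).take m = (PySem.List.insertBy b x l).take m := by
  intro m l
  induction l generalizing m with
  | nil => simp
  | cons y t ih =>
    cases m with
    | zero => simp
    | succ s =>
      simp only [List.take_succ_cons, PySem.List.insertBy]
      by_cases h : b x y = true
      · simp only [h, if_true, List.take_succ_cons]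
        cases s with
        | zero => simp
        | succ u => simp [List.take_take]
      · simp [h, ih]

-- dropWhile is drop at the takeWhile boundary (no such lemma found in Mathlib)
theorem dropWhile_eq_drop_length_takeWhile (p : (String × Int) → Bool) (l : List (String × Int)) :
    l.dropWhile p = l.drop (l.takeWhile p).length := by
  induction l with
  | nil => rfl
  | cons x t ih =>
    simp only [List.dropWhile, List.takeWhile]
    by_cases h : p x = true
    · simp [h, ih]
    · simp [h]

-- B's guarded insert-and-pop step IS 'insert then truncate to m'
theorem stepB_eq_take (r : Int) (m : Nat) (hm : r = (m : Int)) (e : String) (c : Int)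
    (best : List (String × Int)) (hlen : best.length ≤ m) :
    (if ((posLoopB c (PySem.Str.lower e) best : Nat) : Int) < r then
      if r < ((PySem.List.insert best ((posLoopB c (PySem.Str.lower e) best : Nat) : Int) (e, c)).length : Int) then
        (PySem.List.insert best ((posLoopB c (PySem.Str.lower e) best : Nat) : Int) (e, c)).dropLast
      else PySem.List.insert best ((posLoopB c (PySem.Str.lower e) best : Nat) : Int) (e, c)
    else best) = (PySem.List.insertBy befK (e, c) best).take m := by
  have hpos := posLoopB_eq_takeWhile e c best
  have hpre : best.takeWhile (fun y => !befK (e, c) y) <+: best := List.takeWhile_prefix _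
  have htw : best.takeWhile (fun y => !befK (e, c) y)
      = best.take (best.takeWhile (fun y => !befK (e, c) y)).length :=
    List.prefix_iff_eq_take.mp hpre
  have hlentw : (best.takeWhile (fun y => !befK (e, c) y)).length ≤ best.length := hpre.length_le
  have hdw := dropWhile_eq_drop_length_takeWhile (fun y => !befK (e, c) y) best
  have hins : PySem.List.insertBy befK (e, c) best
      = best.takeWhile (fun y => !befK (e, c) y) ++ (e, c) ::
        best.drop (best.takeWhile (fun y => !befK (e, c) y)).length := by
    rw [insertBy_eq_takeWhile_dropWhile, hdw]
  by_cases hlt : ((posLoopB c (PySem.Str.lower e) best : Nat) : Int) < r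
  · rw [if_pos hlt]
    have hi : posLoopB c (PySem.Str.lower e) best ≤ best.length := hpos ▸ hlentw
    rw [PySem.List.insert_natCast best _ _ hi, hpos, ← htw, ← hins]
    have hlen2 : (PySem.List.insertBy befK (e, c) best).length = best.length + 1 := by
      rw [hins]
      simp only [List.length_append, List.length_cons, List.length_drop]
      omega
    by_cases hover : r < ((PySem.List.insertBy befK (e, c) best).length : Int)
    · rw [if_pos hover, List.dropLast_eq_take, hlen2]
      have hbm : best.length + 1 - 1 = m := by omega
      rw [hbm]
    · rw [if_neg hover]
      exact (List.take_of_length_le (by omega)).symm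
  · rw [if_neg hlt]
    rw [hpos] at hlt
    have hlen_eq : (best.takeWhile (fun y => !befK (e, c) y)).length = best.length := by omega
    have hbm : best.length = m := by omega
    have htweq : best.takeWhile (fun y => !befK (e, c) y) = best := hpre.eq_of_length hlen_eq
    rw [hins, htweq, List.take_append_of_le_length (by omega), ← hbm, List.take_length]

-- the whole bounded single pass equals 'sort everything then take m'
theorem foldB_eq (pc : List (String × Int)) (r : Int) (m : Nat) (hm : r = (m : Int)) :
    ∀ (xs : List String) (acc : List (String × Int)),
      xs.foldl (fun best e =>
        if (PySem.Str.lower e == "obrix") = true then best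
        else
          if ((posLoopB (((PySem.Dict.mk pc).get? e).getD 0) (PySem.Str.lower e) best : Nat) : Int) < r then
            if r < ((PySem.List.insert best ((posLoopB (((PySem.Dict.mk pc).get? e).getD 0) (PySem.Str.lower e) best : Nat) : Int) (e, ((PySem.Dict.mk pc).get? e).getD 0)).length : Int) then
              (PySem.List.insert best ((posLoopB (((PySem.Dict.mk pc).get? e).getD 0) (PySem.Str.lower e) best : Nat) : Int) (e, ((PySem.Dict.mk pc).get? e).getD 0)).dropLast
            else PySem.List.insert best ((posLoopB (((PySem.Dict.mk pc).get? e).getD 0) (PySem.Str.lower e) best : Nat) : Int) (e, ((PySem.Dict.mk pc).get? e).getD 0)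
          else best) (acc.take m)
      = (((xs.filter (fun e => PySem.Str.lower e != "obrix")).map
            (fun e => (e, ((PySem.Dict.mk pc).get? e).getD 0))).foldl
          (fun a x => PySem.List.insertBy befK x a) acc).take m := by
  intro xs
  induction xs with
  | nil => intro acc; simp
  | cons x t ih =>
    intro acc
    simp only [List.foldl_cons, List.filter_cons]
    by_cases hx : PySem.Str.lower x = "obrix"
    · have h1 : (PySem.Str.lower x == "obrix") = true := beq_iff_eq.mpr hx
      have h2 : (PySem.Str.lower x != "obrix") = false := by rw [bne, h1]; rfl
      simp only [h1, h2, if_true, Bool.false_eq_true, if_false]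
      exact ih acc
    · have h1 : (PySem.Str.lower x == "obrix") = false := beq_eq_false_iff_ne.mpr hx
      have h2 : (PySem.Str.lower x != "obrix") = true := by rw [bne, h1]; rfl
      have hstep := stepB_eq_take r m hm x (((PySem.Dict.mk pc).get? x).getD 0) (acc.take m)
        (by rw [List.length_take]; omega)
      simp only [h1, h2, if_true, Bool.false_eq_true, if_false, List.map_cons, List.foldl_cons]
      rw [hstep, take_insertBy_take]
      exact ih _

-- ===== VERDICT (by name: the statement is the Claim_ definition above) =====
theorem select_deep_test_engines_spec : Claim_equal_select_deep_test_engines := by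
  intro ae pc n _
  unfold Spec_select_deep_test_engines select_deep_test_engines select_deep_test_engines_alt
  have hlow : PySem.Str.lower "Obrix" = "obrix" := rfl
  have hs2 : ∀ (l : List (String × Int)),
      PySem.List.sorted2 l (fun x => -x.2) (fun x => PySem.Str.lower x.1) false
        = l.foldl (fun a x => PySem.List.insertBy befK x a) [] := fun _ => rfl
  simp only [hlow, PySem.Dict.getD, foldl_insert_lower_get ae PySem.Dict.empty,
    PySem.Dict.get?_empty, foldl_keep_last, Option.or_none, hs2]
  cases hF : ae.reverse.find? (fun e => PySem.Str.lower e == "obrix") with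
  | some f =>
    have hmem : f ∈ ae := by simpa using List.mem_of_find?_eq_some hF
    have hcon : ae.contains f = true := by simpa using hmem
    simp only [Option.getD_some, hcon, Bool.true_or, if_true,
      selLoopA_eq_take, List.nil_append, List.length_cons, List.length_nil, Nat.cast_one,
      Nat.zero_add]
    by_cases hn : n ≤ 0
    · have h0 : (n - 1).toNat = 0 := by omega
      rw [if_pos hn]
      rw [h0, List.take_zero, List.append_nil]
      exact slice_nonpos_short _ n hn (by simp)
    · rw [if_neg hn]
      have hfold := foldB_eq pc (n - 1) (n - 1).toNat (by omega) ae []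
      rw [List.take_nil] at hfold
      rw [hfold]
      rw [PySem.List.slice_to _ (by omega : (0:Int) ≤ n)]
      refine List.take_of_length_le ?_
      simp only [List.length_append, List.length_take, List.length_cons, List.length_nil]
      omega
  | none =>
    have hnone := List.find?_eq_none.mp hF
    have hcon : ae.contains "Obrix" = false := by
      by_contra h
      have hm : "Obrix" ∈ ae := by simpa using Bool.of_not_eq_false h
      exact absurd (by decide : (PySem.Str.lower "Obrix" == "obrix") = true)
        (by simpa using hnone "Obrix" (List.mem_reverse.mpr hm))
    simp only [Option.getD_none, hcon, Bool.or_self, if_false,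
      Bool.false_eq_true, selLoopA_eq_take, List.nil_append, List.length_nil, Nat.cast_zero,
      Int.sub_zero]
    by_cases hn : n ≤ 0
    · have h0 : n.toNat = 0 := by omega
      rw [if_pos hn, h0, List.take_zero]
      exact slice_nonpos_short _ n hn (by simp)
    · rw [if_neg hn]
      have hfold := foldB_eq pc n n.toNat (by omega) ae []
      rw [List.take_nil] at hfold
      rw [hfold]
      rw [PySem.List.slice_to _ (by omega : (0:Int) ≤ n), List.take_take]
      simp
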